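-- pv_equiv track=rewrite | github.com/gustavoheidemanndev/LotteryGameGenerator | app/game_generator_utils.py | remove_lists_with_long_sequences
-- ===== SOURCE A (Python) =====
-- def remove_lists_with_long_sequences(lists):
--     def has_long_sequence(lst):
--         count = 1
--         for i in range(1, len(lst)):
--             if lst[i] == lst[i-1] + 1:
--                 count += 1
--                 if count > 4:
--                     return True
--             else:
--                 count = 1
--         return False
--     filtered_lists = [lst for lst in lists if not has_long_sequence(lst)]
--     return filtered_lists
-- ===== SOURCE B (Python) =====
-- def remove_lists_with_long_sequences(lists):
--     def window_at(lst, i):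
--         # five consecutive increasing ints starting at index i
--         return all(lst[i + k] == lst[i + k - 1] + 1 for k in range(1, 5))
--
--     return [lst for lst in lists
--             if not any(window_at(lst, i) for i in range(len(lst) - 4))]
-- ===== Notes on version B (the rewrite author's own statement) =====
-- stated objective: alternative
-- what changed: Replaces the running-counter single scan (count of the current run, reset on break, early return past 4) with a sliding-window test: keep a list iff no start index has five consecutive +1 elements.
import Mathlib
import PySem

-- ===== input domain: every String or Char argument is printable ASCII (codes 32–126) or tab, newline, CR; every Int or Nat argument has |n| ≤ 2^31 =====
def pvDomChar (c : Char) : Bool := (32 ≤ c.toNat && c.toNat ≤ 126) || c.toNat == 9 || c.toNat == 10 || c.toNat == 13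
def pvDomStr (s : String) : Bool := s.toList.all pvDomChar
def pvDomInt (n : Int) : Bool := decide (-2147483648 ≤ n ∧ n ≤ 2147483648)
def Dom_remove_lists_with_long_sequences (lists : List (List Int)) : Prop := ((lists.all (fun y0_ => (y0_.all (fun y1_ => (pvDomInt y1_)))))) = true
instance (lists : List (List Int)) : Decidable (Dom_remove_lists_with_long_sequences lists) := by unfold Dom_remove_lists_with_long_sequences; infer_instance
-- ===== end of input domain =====

-- B replaces A's running-counter scan by a sliding-window test (same cost class): alternative decomposition.


-- ===== PORT A =====
-- the 'for i in range(1, len(lst))' loop with early return, carrying the running count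
def pvAGo (lst : List Int) (i : Nat) (count : Nat) : Bool :=
  if i < lst.length then
    if lst.getD i 0 == lst.getD (i - 1) 0 + 1 then
      if count + 1 > 4 then true
      else pvAGo lst (i + 1) (count + 1)
    else pvAGo lst (i + 1) 1
  else false
  termination_by lst.length - i

def pvHasLongSequence (lst : List Int) : Bool := pvAGo lst 1 1

def remove_lists_with_long_sequences (lists : List (List Int)) : List (List Int) :=
  lists.filter (fun lst => !pvHasLongSequence lst)

-- ===== PORT B =====
-- window_at(lst, i): five consecutive increasing ints starting at index i
def pvWindowAt (lst : List Int) (i : Nat) : Bool :=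
  (List.range' 1 4).all (fun k => lst.getD (i + k) 0 == lst.getD (i + k - 1) 0 + 1)

def remove_lists_with_long_sequences_alt (lists : List (List Int)) : List (List Int) :=
  lists.filter (fun lst => !((List.range (lst.length - 4)).any (fun i => pvWindowAt lst i)))

-- ===== PRECONDITION & SPEC =====
def Spec_remove_lists_with_long_sequences (lists : List (List Int)) (out : List (List Int)) : Prop := out = remove_lists_with_long_sequences_alt lists
instance (lists : List (List Int)) (out : List (List Int)) : Decidable (Spec_remove_lists_with_long_sequences lists out) := by unfold Spec_remove_lists_with_long_sequences; infer_instance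

-- ===== CLAIM (what is proved, stated in full; the proofs are below) =====
def Claim_equal_remove_lists_with_long_sequences : Prop := ∀ (lists : List (List Int)), Dom_remove_lists_with_long_sequences lists → Spec_remove_lists_with_long_sequences lists (remove_lists_with_long_sequences lists)

-- ===== LEMMAS AND PROOFS =====

-- "step j" : position j continues a consecutive run
def pvStep (lst : List Int) (j : Nat) : Bool := lst.getD j 0 == lst.getD (j - 1) 0 + 1

-- characterisation of A's loop: with the invariant that the previous (count-1) steps hold,
-- pvAGo returns true iff some block of 4 consecutive steps at positions p..p+3 with p+count > i exists
theorem pvAGo_iff (lst : List Int) (n i count : Nat)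
    (hn : lst.length - i ≤ n) (h1 : 1 ≤ count) (h4 : count ≤ 4) (hci : count ≤ i)
    (H : ∀ j, j < i → i < j + count → pvStep lst j = true) :
    pvAGo lst i count = true ↔
      ∃ p, 1 ≤ p ∧ i < p + count ∧ p + 3 < lst.length ∧
        (∀ j, p ≤ j → j ≤ p + 3 → pvStep lst j = true) := by
  induction n generalizing i count with
  | zero =>
    have hlen : lst.length ≤ i := by omega
    rw [pvAGo]
    simp only [if_neg (by omega : ¬ i < lst.length)]
    constructor
    · intro h; exact absurd h (by simp)
    · rintro ⟨p, hp1, hpc, hpl, _⟩; omega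
  | succ n ih =>
    rw [pvAGo]
    by_cases hi : i < lst.length
    · simp only [if_pos hi]
      by_cases hs : pvStep lst i = true
      · simp only [pvStep] at hs
        simp only [hs, if_pos]
        by_cases hc4 : count + 1 > 4
        · have hc : count = 4 := by omega
          simp only [if_pos hc4, true_iff]
          refine ⟨i - 3, by omega, by omega, by omega, ?_⟩
          intro j hj1 hj2
          by_cases hji : j < i
          · exact H j hji (by omega)
          · have : j = i := by omega
            subst this; simpa [pvStep] using hs
        · simp only [if_neg hc4]
          rw [ih (i + 1) (count + 1) (by omega) (by omega) (by omega) (by omega)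
            (by
              intro j hj1 hj2
              by_cases hji : j < i
              · exact H j hji (by omega)
              · have : j = i := by omega
                subst this; simpa [pvStep] using hs)]
          constructor
          · rintro ⟨p, hp1, hpc, hpl, hw⟩; exact ⟨p, hp1, by omega, hpl, hw⟩
          · rintro ⟨p, hp1, hpc, hpl, hw⟩; exact ⟨p, hp1, by omega, hpl, hw⟩
      · simp only [pvStep] at hs
        rw [if_neg hs]
        rw [ih (i + 1) 1 (by omega) (by omega) (by omega) (by omega) (by omega)]
        constructor
        · rintro ⟨p, hp1, hpc, hpl, hw⟩; exact ⟨p, hp1, by omega, hpl, hw⟩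
        · rintro ⟨p, hp1, hpc, hpl, hw⟩
          refine ⟨p, hp1, ?_, hpl, hw⟩
          by_cases hpi : i < p
          · omega
          · -- the window would cover position i, contradicting ¬ step i
            exfalso
            have hthis : pvStep lst i = true := hw i (by omega) (by omega)
            simp only [pvStep] at hthis
            exact hs hthis
    · simp only [if_neg hi]
      constructor
      · intro h; exact absurd h (by simp)
      · rintro ⟨p, hp1, hpc, hpl, _⟩; omega

-- B's per-list test, characterised the same way (p = i + 1)
theorem pvB_iff (lst : List Int) :
    ((List.range (lst.length - 4)).any (fun i => pvWindowAt lst i)) = true ↔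
      ∃ p, 1 ≤ p ∧ 0 < p + 1 ∧ p + 3 < lst.length ∧
        (∀ j, p ≤ j → j ≤ p + 3 → pvStep lst j = true) := by
  simp only [List.any_eq_true, List.mem_range, pvWindowAt, List.all_eq_true]
  constructor
  · rintro ⟨i, hi, hw⟩
    refine ⟨i + 1, by omega, by omega, by omega, ?_⟩
    intro j hj1 hj2
    have hk : j - i ∈ List.range' 1 4 :=
      List.mem_range'_1.mpr ⟨by omega, by omega⟩
    have := hw (j - i) hk
    have hji : i + (j - i) = j := by omega
    simpa [pvStep, hji] using this
  · rintro ⟨p, hp1, _, hpl, hw⟩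
    refine ⟨p - 1, by omega, ?_⟩
    intro k hk
    rw [List.mem_range'_1] at hk
    have := hw (p - 1 + k) (by omega) (by omega)
    simpa [pvStep] using this

theorem pvHas_eq (lst : List Int) :
    pvHasLongSequence lst =
      ((List.range (lst.length - 4)).any (fun i => pvWindowAt lst i)) := by
  have hA := pvAGo_iff lst lst.length 1 1 (by omega) (by omega) (by omega) (by omega)
    (by intro j hj1 hj2; omega)
  have hB := pvB_iff lst
  rw [Bool.eq_iff_iff, pvHasLongSequence, hA, hB]
  constructor
  · rintro ⟨p, hp1, hpc, hpl, hw⟩; exact ⟨p, hp1, by omega, hpl, hw⟩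
  · rintro ⟨p, hp1, hpc, hpl, hw⟩; exact ⟨p, hp1, by omega, hpl, hw⟩

-- ===== VERDICT (by name: the statement is the Claim_ definition above) =====
theorem remove_lists_with_long_sequences_spec : Claim_equal_remove_lists_with_long_sequences := by
  intro lists _
  unfold Spec_remove_lists_with_long_sequences
  unfold remove_lists_with_long_sequences remove_lists_with_long_sequences_alt
  apply List.filter_congr
  intro lst _
  rw [pvHas_eq]
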